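-- pv_equiv track=rewrite | github.com/dev-hang/Programmers-Algorithm | level2/collision_risk_prevention.py | collision_risk_prevention
-- ===== SOURCE A (Python) =====
-- from collections import Counter
--
-- def collision_risk_prevention(points, routes):
--     answer = 0
--     paths = []
--
--     for route in routes:
--         path = []
--         time = 0
--         for i in range(len(route)-1):
--             from_x, from_y = points[route[i]-1]
--             to_x, to_y = points[route[i+1]-1]
--             while from_x != to_x:
--                 path.append((from_x, from_y, time))
--                 if from_x < to_x:
--                     from_x += 1
--                 else:
--                     from_x -= 1
--                 time += 1
--             while from_y != to_y:
--                 path.append((from_x, from_y, time))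
--                 if from_y < to_y:
--                     from_y += 1
--                 else:
--                     from_y -= 1
--                 time += 1
--
--         path.append((from_x, from_y, time))
--         paths.extend(path)
--
--     counter = Counter(paths)
--
--     for v in counter.values():
--         if v >= 2:
--             answer += 1
--
--     return answer
-- ===== SOURCE B (Python) =====
-- def collision_risk_prevention(points, routes):
--     # Time-major sweep: no cell lists are ever materialised. For each time step t
--     # up to the longest route's travel time, compute every robot's position at t
--     # in closed form from its waypoints, and count grid squares holding 2+ robots.
--     def duration(route):
--         x, y = points[route[0] - 1]
--         total = 0
--         for k in route[1:]:
--             tx, ty = points[k - 1]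
--             total += abs(tx - x) + abs(ty - y)
--             x, y = tx, ty
--         return total
--
--     def position(route, t):
--         # position of the robot at time t, or None if it has already vanished
--         x, y = points[route[0] - 1]
--         for k in route[1:]:
--             tx, ty = points[k - 1]
--             dx = abs(tx - x)
--             if t < dx:
--                 return (x + (1 if x <= tx else -1) * t, y)
--             t -= dx
--             dy = abs(ty - y)
--             if t < dy:
--                 return (tx, y + (1 if y <= ty else -1) * t)
--             t -= dy
--             x, y = tx, ty
--         return (x, y) if t == 0 else None
--
--     answer = 0
--     horizon = max((duration(r) for r in routes), default=-1)
--     for t in range(horizon + 1):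
--         here = {}
--         for r in routes:
--             p = position(r, t)
--             if p is not None:
--                 here[p] = here.get(p, 0) + 1
--         answer += sum(1 for c in here.values() if c >= 2)
--     return answer
-- ===== Notes on version B (the rewrite author's own statement) =====
-- stated objective: alternative
-- what changed: B never materialises any cell list: instead of A's robot-major while-loop simulation that collects every (x,y,t) cell and counts duplicates with a Counter, B sweeps time-major, computing each robot's position at each time step t in closed form from its waypoints (segment arithmetic with early return) and summing, per time step, the number of grid squares holding two or more robots.
-- outside the precondition, e.g. on collision_risk_prevention([(0, 0), (1, 0)], [[1, 2], [1]]): A returns 0, B returns 1; on collision_risk_prevention([(0, 0), (1, 0)], [[1, 2], []]): A returns 0, B raises IndexError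
import Mathlib
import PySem

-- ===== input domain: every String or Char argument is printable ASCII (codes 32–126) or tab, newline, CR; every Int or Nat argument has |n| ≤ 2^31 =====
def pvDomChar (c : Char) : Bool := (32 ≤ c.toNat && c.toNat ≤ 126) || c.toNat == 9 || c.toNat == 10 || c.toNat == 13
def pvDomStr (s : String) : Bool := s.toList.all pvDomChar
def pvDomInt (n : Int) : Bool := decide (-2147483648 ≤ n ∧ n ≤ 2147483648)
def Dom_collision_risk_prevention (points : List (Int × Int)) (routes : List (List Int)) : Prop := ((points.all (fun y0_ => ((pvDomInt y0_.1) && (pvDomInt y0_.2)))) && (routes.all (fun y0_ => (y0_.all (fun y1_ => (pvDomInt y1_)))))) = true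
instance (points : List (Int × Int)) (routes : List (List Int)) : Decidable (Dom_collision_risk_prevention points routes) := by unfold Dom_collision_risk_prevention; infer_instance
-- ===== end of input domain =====

-- B sweeps time-major, computing each robot's position at each time step in closed form
-- from its waypoints, instead of A's robot-major cell-list simulation plus a Counter
-- pass (objective: alternative).

-- ===== PORT A =====

-- points[k-1] with Python (possibly negative) indexing; Python raises IndexError where
-- pyGet? is none — those inputs are outside Pre_ and (0,0) is a mere placeholder there.
def pvLookup (points : List (Int × Int)) (k : Int) : Int × Int :=
  (PySem.List.pyGet? points (k - 1)).getD (0, 0)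

-- the 'while from_x != to_x' loop: appended cells and the time after the loop
def pvWalkX (fx fy tx t : Int) : List (Int × Int × Int) × Int :=
  if fx = tx then ([], t)
  else if fx < tx then
    let r := pvWalkX (fx + 1) fy tx (t + 1)
    ((fx, fy, t) :: r.1, r.2)
  else
    let r := pvWalkX (fx - 1) fy tx (t + 1)
    ((fx, fy, t) :: r.1, r.2)
termination_by (tx - fx).natAbs
decreasing_by all_goals omega

-- the 'while from_y != to_y' loop (from_x already equal to to_x)
def pvWalkY (x fy ty t : Int) : List (Int × Int × Int) × Int :=
  if fy = ty then ([], t)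
  else if fy < ty then
    let r := pvWalkY x (fy + 1) ty (t + 1)
    ((x, fy, t) :: r.1, r.2)
  else
    let r := pvWalkY x (fy - 1) ty (t + 1)
    ((x, fy, t) :: r.1, r.2)
termination_by (ty - fy).natAbs
decreasing_by all_goals omega

-- one iteration of 'for i in range(len(route)-1)': ab = (route[i], route[i+1]);
-- state = (path so far, from_x, from_y, time)
def pvStepA (points : List (Int × Int)) (st : List (Int × Int × Int) × Int × Int × Int)
    (ab : Int × Int) : List (Int × Int × Int) × Int × Int × Int :=
  let f := pvLookup points ab.1
  let g := pvLookup points ab.2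
  let wx := pvWalkX f.1 f.2 g.1 st.2.2.2
  let wy := pvWalkY g.1 f.2 g.2 wx.2
  (st.1 ++ wx.1 ++ wy.1, g.1, g.2, wy.2)

-- one route: path = [], time = 0, segment loop, final append; from_x/from_y enter stale
def pvRouteA (points : List (Int × Int)) (xy : Int × Int) (route : List Int) :
    List (Int × Int × Int) × Int × Int :=
  let r := (route.zip route.tail).foldl (pvStepA points) ([], xy.1, xy.2, 0)
  (r.1 ++ [(r.2.1, r.2.2.1, r.2.2.2)], r.2.1, r.2.2.1)

def collision_risk_prevention (points : List (Int × Int)) (routes : List (List Int)) : Int :=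
  -- before the first route from_x/from_y are Python-undefined (NameError if read);
  -- (0, 0) is a placeholder, those inputs are outside Pre_
  let r := routes.foldl
    (fun (st : List (Int × Int × Int) × Int × Int) route =>
      let pr := pvRouteA points st.2 route
      (st.1 ++ pr.1, pr.2)) ([], 0, 0)
  let counter := PySem.Dict.counter r.1
  counter.values.foldl (fun ans v => if 2 ≤ v then ans + 1 else ans) 0

-- ===== PORT B =====

-- duration(route): total travel time of one robot
def pvDurB (points : List (Int × Int)) (route : List Int) : Int :=
  let p0 := pvLookup points (route.headD 0)
  ((route.drop 1).foldl
    (fun (st : Int × Int × Int) k =>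
      let g := pvLookup points k
      (st.1 + |g.1 - st.2.1| + |g.2 - st.2.2|, g.1, g.2)) (0, p0.1, p0.2)).1

-- the 'for k in route[1:]' loop of position(route, t), with its early returns
def pvPosGo (points : List (Int × Int)) (x y t : Int) (ks : List Int) : Option (Int × Int) :=
  match ks with
  | [] => if t = 0 then some (x, y) else none
  | k :: ks =>
    let g := pvLookup points k
    let dx := |g.1 - x|
    if t < dx then some (x + (if x ≤ g.1 then 1 else -1) * t, y)
    else
      let dy := |g.2 - y|
      if t - dx < dy then some (g.1, y + (if y ≤ g.2 then 1 else -1) * (t - dx))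
      else pvPosGo points g.1 g.2 (t - dx - dy) ks

-- position(route, t): where the robot is at time t, none once it has vanished
def pvPosB (points : List (Int × Int)) (route : List Int) (t : Int) : Option (Int × Int) :=
  let p0 := pvLookup points (route.headD 0)
  pvPosGo points p0.1 p0.2 t (route.drop 1)

def collision_risk_prevention_alt (points : List (Int × Int)) (routes : List (List Int)) : Int :=
  let horizon := PySem.List.maxD (routes.map (pvDurB points)) (fun x => x) (-1)
  (List.range (horizon + 1).toNat).foldl
    (fun ans (tN : Nat) =>
      let here := routes.foldl
        (fun (d : PySem.Dict (Int × Int) Int) r =>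
          match pvPosB points r (tN : Int) with
          | none => d
          | some p => d.insert p (d.getD p 0 + 1)) PySem.Dict.empty
      ans + here.values.foldl (fun s c => if 2 ≤ c then s + 1 else s) 0) 0

-- ===== PRECONDITION & SPEC =====

-- Pre_ excludes (a) inputs where some route has fewer than two waypoints: A raises
-- UnboundLocalError when such a route comes first, and otherwise appends a cell built from
-- variables left over from the PREVIOUS route — an unmatchable accident of A's shared loop
-- state, where B uses the route's own waypoint (and raises IndexError on an empty route);
-- and (b) inputs with an out-of-range waypoint, on which both programs raise IndexError.
def Pre_collision_risk_prevention (points : List (Int × Int)) (routes : List (List Int)) : Prop :=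
  (∀ r ∈ routes, 2 ≤ r.length) ∧
  (∀ r ∈ routes, ∀ k ∈ r, 1 - (points.length : Int) ≤ k ∧ k ≤ (points.length : Int))

instance (points : List (Int × Int)) (routes : List (List Int)) :
    Decidable (Pre_collision_risk_prevention points routes) := by
  unfold Pre_collision_risk_prevention; infer_instance

def pvWitness_collision_risk_prevention : (List (Int × Int)) × List (List Int) :=
  ([(0, 0), (2, 1)], [[1, 2], [2, 1]])

def Spec_collision_risk_prevention (points : List (Int × Int)) (routes : List (List Int)) (out : Int) : Prop := out = collision_risk_prevention_alt points routes
instance (points : List (Int × Int)) (routes : List (List Int)) (out : Int) : Decidable (Spec_collision_risk_prevention points routes out) := by unfold Spec_collision_risk_prevention; infer_instance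

-- ===== CLAIM (what is proved, stated in full; the proofs are below) =====
def Claim_equal_collision_risk_prevention : Prop := ∀ (points : List (Int × Int)) (routes : List (List Int)), Dom_collision_risk_prevention points routes → Pre_collision_risk_prevention points routes → Spec_collision_risk_prevention points routes (collision_risk_prevention points routes)

-- ===== LEMMAS AND PROOFS =====

-- the cells of one segment (x,y) → points[k-1], in A's emission order, in closed form
def pvSegCells (x y t tx ty : Int) : List (Int × Int × Int) :=
  (List.range (tx - x).natAbs).map
    (fun (i : Nat) => (x + (if x ≤ tx then 1 else -1) * (i : Int), y, t + (i : Int))) ++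
  (List.range (ty - y).natAbs).map
    (fun (j : Nat) => (tx, y + (if y ≤ ty then 1 else -1) * (j : Int), t + |tx - x| + (j : Int)))

-- cells of the segment chain from (x,y) at time t through waypoints ks, with final state
def pvChain (points : List (Int × Int)) (x y t : Int) (ks : List Int) :
    List (Int × Int × Int) × Int × Int × Int :=
  match ks with
  | [] => ([], x, y, t)
  | k :: ks =>
    let g := pvLookup points k
    let r := pvChain points g.1 g.2 (t + |g.1 - x| + |g.2 - y|) ks
    (pvSegCells x y t g.1 g.2 ++ r.1, r.2)

-- the chain's cells including the final resting cell
def pvFull (points : List (Int × Int)) (x y t : Int) (ks : List Int) :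
    List (Int × Int × Int) :=
  (pvChain points x y t ks).1 ++
    [((pvChain points x y t ks).2.1, (pvChain points x y t ks).2.2.1,
      (pvChain points x y t ks).2.2.2)]

-- the full cell list of one route (including the final resting cell)
def pvRouteCells (points : List (Int × Int)) (route : List Int) : List (Int × Int × Int) :=
  let p0 := pvLookup points (route.headD 0)
  pvFull points p0.1 p0.2 0 (route.drop 1)

theorem pvWalkX_eq (fx fy tx t : Int) :
    pvWalkX fx fy tx t =
      ((List.range (tx - fx).natAbs).map
        (fun (i : Nat) => (fx + (if fx ≤ tx then 1 else -1) * (i : Int), fy, t + (i : Int))),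
       t + |tx - fx|) := by
  fun_induction pvWalkX fx fy tx t with
  | case1 => simp
  | case2 =>
    rename_i fx t hne hlt r ih
    have hle : fx ≤ tx := le_of_lt hlt
    have hle1 : fx + 1 ≤ tx := by omega
    have hn : (tx - fx).natAbs = (tx - (fx + 1)).natAbs + 1 := by omega
    change ((fx, fy, t) :: (pvWalkX (fx + 1) fy tx (t + 1)).1,
            (pvWalkX (fx + 1) fy tx (t + 1)).2) = _
    rw [ih, hn, List.range_succ_eq_map]
    rw [Prod.mk.injEq]
    refine ⟨?_, ?_⟩
    · simp only [List.map_cons, List.map_map, hle, hle1, if_pos, List.cons.injEq]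
      refine ⟨by simp, ?_⟩
      apply List.map_congr_left
      intro i _
      simp only [Function.comp, Prod.mk.injEq]
      push_cast
      refine ⟨by ring, trivial, by ring⟩
    · have h2 : |tx - fx| = tx - fx := abs_of_nonneg (by omega)
      have h3 : |tx - (fx + 1)| = tx - (fx + 1) := abs_of_nonneg (by omega)
      omega
  | case3 =>
    rename_i fx t hne hnlt r ih
    have hle : ¬ fx ≤ tx := by omega
    have hlt : tx < fx := by omega
    change ((fx, fy, t) :: (pvWalkX (fx - 1) fy tx (t + 1)).1,
            (pvWalkX (fx - 1) fy tx (t + 1)).2) = _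
    by_cases hb : fx - 1 = tx
    · have e1 : (tx - (fx - 1)).natAbs = 0 := by omega
      have e0 : (tx - fx).natAbs = 1 := by omega
      have h2 : |tx - fx| = -(tx - fx) := abs_of_nonpos (by omega)
      have h3 : |tx - (fx - 1)| = 0 := by rw [show tx - (fx - 1) = 0 by omega]; simp
      rw [ih, e1, e0]
      simp [hle, h2, h3]
      omega
    · have hle1 : ¬ fx - 1 ≤ tx := by omega
      have hn : (tx - fx).natAbs = (tx - (fx - 1)).natAbs + 1 := by omega
      rw [ih, hn, List.range_succ_eq_map]
      rw [Prod.mk.injEq]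
      refine ⟨?_, ?_⟩
      · simp only [List.map_cons, List.map_map, hle, hle1, if_neg, not_false_iff,
          List.cons.injEq]
        refine ⟨by simp, ?_⟩
        apply List.map_congr_left
        intro i _
        simp only [Function.comp, Prod.mk.injEq]
        push_cast
        refine ⟨by ring, trivial, by ring⟩
      · have h2 : |tx - fx| = -(tx - fx) := abs_of_nonpos (by omega)
        have h3 : |tx - (fx - 1)| = -(tx - (fx - 1)) := abs_of_nonpos (by omega)
        omega

theorem pvWalkY_eq (x fy ty t : Int) :
    pvWalkY x fy ty t =
      ((List.range (ty - fy).natAbs).map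
        (fun (i : Nat) => (x, fy + (if fy ≤ ty then 1 else -1) * (i : Int), t + (i : Int))),
       t + |ty - fy|) := by
  fun_induction pvWalkY x fy ty t with
  | case1 => simp
  | case2 =>
    rename_i fy t hne hlt r ih
    have hle : fy ≤ ty := le_of_lt hlt
    have hle1 : fy + 1 ≤ ty := by omega
    have hn : (ty - fy).natAbs = (ty - (fy + 1)).natAbs + 1 := by omega
    change ((x, fy, t) :: (pvWalkY x (fy + 1) ty (t + 1)).1,
            (pvWalkY x (fy + 1) ty (t + 1)).2) = _
    rw [ih, hn, List.range_succ_eq_map]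
    rw [Prod.mk.injEq]
    refine ⟨?_, ?_⟩
    · simp only [List.map_cons, List.map_map, hle, hle1, if_pos, List.cons.injEq]
      refine ⟨by simp, ?_⟩
      apply List.map_congr_left
      intro i _
      simp only [Function.comp, Prod.mk.injEq]
      push_cast
      refine ⟨trivial, by ring, by ring⟩
    · have h2 : |ty - fy| = ty - fy := abs_of_nonneg (by omega)
      have h3 : |ty - (fy + 1)| = ty - (fy + 1) := abs_of_nonneg (by omega)
      omega
  | case3 =>
    rename_i fy t hne hnlt r ih
    have hle : ¬ fy ≤ ty := by omega
    have hlt : ty < fy := by omega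
    change ((x, fy, t) :: (pvWalkY x (fy - 1) ty (t + 1)).1,
            (pvWalkY x (fy - 1) ty (t + 1)).2) = _
    by_cases hb : fy - 1 = ty
    · have e1 : (ty - (fy - 1)).natAbs = 0 := by omega
      have e0 : (ty - fy).natAbs = 1 := by omega
      have h2 : |ty - fy| = -(ty - fy) := abs_of_nonpos (by omega)
      have h3 : |ty - (fy - 1)| = 0 := by rw [show ty - (fy - 1) = 0 by omega]; simp
      rw [ih, e1, e0]
      simp [hle, h2, h3]
      omega
    · have hle1 : ¬ fy - 1 ≤ ty := by omega
      have hn : (ty - fy).natAbs = (ty - (fy - 1)).natAbs + 1 := by omega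
      rw [ih, hn, List.range_succ_eq_map]
      rw [Prod.mk.injEq]
      refine ⟨?_, ?_⟩
      · simp only [List.map_cons, List.map_map, hle, hle1, if_neg, not_false_iff,
          List.cons.injEq]
        refine ⟨by simp, ?_⟩
        apply List.map_congr_left
        intro i _
        simp only [Function.comp, Prod.mk.injEq]
        push_cast
        refine ⟨trivial, by ring, by ring⟩
      · have h2 : |ty - fy| = -(ty - fy) := abs_of_nonpos (by omega)
        have h3 : |ty - (fy - 1)| = -(ty - (fy - 1)) := abs_of_nonpos (by omega)
        omega

theorem pvChainA_aux (points : List (Int × Int)) (ks' : List Int) :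
    ∀ (k0 k1 : Int) (path : List (Int × Int × Int)) (x y t : Int),
      ((k0 :: k1 :: ks').zip (k1 :: ks')).foldl (pvStepA points) (path, x, y, t) =
        (path ++ (pvChain points (pvLookup points k0).1 (pvLookup points k0).2 t (k1 :: ks')).1,
         (pvChain points (pvLookup points k0).1 (pvLookup points k0).2 t (k1 :: ks')).2) := by
  induction ks' with
  | nil =>
    intro k0 k1 path x y t
    simp only [List.zip_cons_cons, List.zip_nil_right, List.foldl_cons, List.foldl_nil,
      pvStepA, pvWalkX_eq, pvWalkY_eq, pvChain, pvSegCells, List.append_nil,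
      List.append_assoc]
  | cons k2 ks' ih =>
    intro k0 k1 path x y t
    rw [List.zip_cons_cons, List.foldl_cons]
    have hstep : pvStepA points (path, x, y, t) (k0, k1) =
        (path ++ pvSegCells (pvLookup points k0).1 (pvLookup points k0).2 t
            (pvLookup points k1).1 (pvLookup points k1).2,
         (pvLookup points k1).1, (pvLookup points k1).2,
         t + |(pvLookup points k1).1 - (pvLookup points k0).1| +
           |(pvLookup points k1).2 - (pvLookup points k0).2|) := by
      simp only [pvStepA, pvWalkX_eq, pvWalkY_eq, pvSegCells, List.append_assoc]
    rw [hstep, ih]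
    simp only [pvChain, List.append_assoc]

theorem pvRouteA_eq (points : List (Int × Int)) (route : List Int) (h : 2 ≤ route.length)
    (xy : Int × Int) :
    (pvRouteA points xy route).1 = pvRouteCells points route := by
  match route with
  | [] => simp at h
  | [k0] => simp at h
  | k0 :: k1 :: rest =>
    simp only [pvRouteA, List.tail_cons,
      pvChainA_aux points rest k0 k1 [] xy.1 xy.2 0,
      pvRouteCells, pvFull, List.headD, List.drop_succ_cons, List.drop_zero,
      List.nil_append]

theorem pvTopA (points : List (Int × Int)) (routes : List (List Int))
    (h : ∀ r ∈ routes, 2 ≤ r.length) :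
    ∀ (acc : List (Int × Int × Int)) (xy : Int × Int),
      (routes.foldl
        (fun (st : List (Int × Int × Int) × Int × Int) route =>
          let pr := pvRouteA points st.2 route
          (st.1 ++ pr.1, pr.2)) (acc, xy)).1 =
        acc ++ (routes.map (pvRouteCells points)).flatten := by
  induction routes with
  | nil => intro acc xy; simp
  | cons r rs ih =>
    intro acc xy
    rw [List.foldl_cons]
    show (rs.foldl _ (acc ++ (pvRouteA points xy r).1, (pvRouteA points xy r).2)).1 = _
    rw [ih (fun r hr => h r (List.mem_cons_of_mem _ hr)),
      pvRouteA_eq points r (h r List.mem_cons_self) xy]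
    simp [List.append_assoc]

-- the distinct elements occurring at least twice, as an Int count
def pvCountDup {α : Type} [BEq α] [LawfulBEq α] [DecidableEq α] (L : List α) : Int :=
  ((PySem.Set.ofList L).countP (fun c => decide (2 ≤ (L.count c : Int))) : Int)

-- 'for v in Counter(L).values(): if v >= 2: n += 1' counts the duplicated elements
theorem pvCounterFold {α : Type} [BEq α] [LawfulBEq α] [DecidableEq α] (L : List α) :
    (PySem.Dict.counter L).values.foldl
      (fun ans v => if 2 ≤ v then ans + 1 else ans) (0 : Int) = pvCountDup L := by
  have hv : (PySem.Dict.counter L).values =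
      (PySem.Set.ofList L).map (fun k => (L.count k : Int)) := by
    show (PySem.Dict.counter L).items.map (·.2) = _
    rw [PySem.Dict.items_counter, List.map_map]
    rfl
  rw [hv, List.foldl_map, PySem.List.foldl_ite_add_one]
  simp [pvCountDup]

-- a loop that skips robots whose position is None is a loop over the filterMap
theorem pvFoldSkipNone (points : List (Int × Int)) (t : Int) (l : List (List Int)) :
    ∀ d : PySem.Dict (Int × Int) Int,
      l.foldl
        (fun (d : PySem.Dict (Int × Int) Int) r =>
          match pvPosB points r t with
          | none => d
          | some p => d.insert p (d.getD p 0 + 1)) d =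
      (l.filterMap (fun r => pvPosB points r t)).foldl
        (fun (d : PySem.Dict (Int × Int) Int) p => d.insert p (d.getD p 0 + 1)) d := by
  induction l with
  | nil => intro d; simp
  | cons a l ih =>
    intro d
    rw [List.foldl_cons, List.filterMap_cons]
    cases h : pvPosB points a t with
    | none => simp only [ih]
    | some b => simp only [List.foldl_cons, ih]

-- B's inner dict loop is Counter of the robots' positions at time t
theorem pvHereDict (points : List (Int × Int)) (routes : List (List Int)) (t : Int) :
    routes.foldl
      (fun (d : PySem.Dict (Int × Int) Int) r =>
        match pvPosB points r t with
        | none => d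
        | some p => d.insert p (d.getD p 0 + 1)) PySem.Dict.empty =
      PySem.Dict.counter (routes.filterMap (fun r => pvPosB points r t)) := by
  rw [pvFoldSkipNone, PySem.Dict.foldl_insert_getD_add_one_eq_counter]

-- count of a fixed cell in a time-stamped range map: at most its own time slot
theorem pvCountRangeMap (n : Nat) (fa fb : Nat → Int) (t0 px py s : Int) :
    (((List.range n).map (fun i => (fa i, fb i, t0 + (i : Int)))).count (px, py, t0 + s)) =
      if 0 ≤ s ∧ s < (n : Int) ∧ px = fa s.toNat ∧ py = fb s.toNat then 1 else 0 := by
  induction n with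
  | zero =>
    simp only [List.range_zero, List.map_nil, List.count_nil, Nat.cast_zero]
    split
    next h => exact absurd h (by rintro ⟨h1, h2, -, -⟩; omega)
    next => rfl
  | succ n ih =>
    rw [List.range_succ, List.map_append, List.count_append, ih]
    simp only [List.map_cons, List.map_nil, List.count_singleton, beq_iff_eq,
      Prod.mk.injEq]
    by_cases hs : s = (n : Int)
    · subst hs
      rw [if_neg (by rintro ⟨-, h2, -, -⟩; omega), Int.toNat_natCast]
      by_cases hf : px = fa n ∧ py = fb n
      · rw [if_pos ⟨hf.1.symm, hf.2.symm, rfl⟩,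
          if_pos ⟨Int.natCast_nonneg n, by push_cast; omega, hf.1, hf.2⟩]
      · rw [if_neg (by rintro ⟨h1, h2, -⟩; exact hf ⟨h1.symm, h2.symm⟩),
          if_neg (by rintro ⟨-, -, h1, h2⟩; exact hf ⟨h1, h2⟩)]
    · have hx : (if fa n = px ∧ fb n = py ∧ t0 + (n : Int) = t0 + s
          then (1 : Nat) else 0) = 0 := if_neg (by rintro ⟨-, -, h⟩; omega)
      rw [hx, add_zero]
      refine if_congr ⟨?_, ?_⟩ rfl rfl
      · rintro ⟨h1, h2, h3⟩; exact ⟨h1, by push_cast; omega, h3⟩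
      · rintro ⟨h1, h2, h3⟩; exact ⟨h1, by push_cast at h2 ⊢; omega, h3⟩

-- cell multiplicity in one segment's cells
theorem pvSegCount (x y t gx gy px py s : Int) :
    (pvSegCells x y t gx gy).count (px, py, t + s) =
      if 0 ≤ s ∧ s < |gx - x| ∧ px = x + (if x ≤ gx then 1 else -1) * s ∧ py = y then 1
      else if 0 ≤ s - |gx - x| ∧ s - |gx - x| < |gy - y| ∧ px = gx ∧
          py = y + (if y ≤ gy then 1 else -1) * (s - |gx - x|) then 1
      else 0 := by
  have h2 : (((List.range ((gy - y).natAbs)).map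
      (fun (j : Nat) => (gx, y + (if y ≤ gy then 1 else -1) * (j : Int),
        t + |gx - x| + (j : Int)))).count
      (px, py, t + |gx - x| + (s - |gx - x|))) =
      if 0 ≤ s - |gx - x| ∧ s - |gx - x| < (((gy - y).natAbs : Nat) : Int) ∧ px = gx ∧
        py = y + (if y ≤ gy then 1 else -1) * (((s - |gx - x|).toNat : Nat) : Int)
      then 1 else 0 :=
    pvCountRangeMap _ _ _ _ _ _ _
  rw [show t + |gx - x| + (s - |gx - x|) = t + s by ring] at h2
  rw [pvSegCells, List.count_append, pvCountRangeMap, h2]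
  have hax : (((gx - x).natAbs : Nat) : Int) = |gx - x| := Int.natCast_natAbs _
  have hay : (((gy - y).natAbs : Nat) : Int) = |gy - y| := Int.natCast_natAbs _
  have habs : 0 ≤ |gx - x| := abs_nonneg _
  by_cases hA : 0 ≤ s ∧ s < |gx - x|
  · have ht : ((s.toNat : Nat) : Int) = s := Int.toNat_of_nonneg hA.1
    have hz : (if 0 ≤ s - |gx - x| ∧ s - |gx - x| < (((gy - y).natAbs : Nat) : Int) ∧
        px = gx ∧ py = y + (if y ≤ gy then 1 else -1) * (((s - |gx - x|).toNat : Nat) : Int)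
        then (1 : Nat) else 0) = 0 :=
      if_neg (by rintro ⟨hc, -, -, -⟩; have := hA.2; omega)
    have hz2 : (if 0 ≤ s - |gx - x| ∧ s - |gx - x| < |gy - y| ∧ px = gx ∧
        py = y + (if y ≤ gy then 1 else -1) * (s - |gx - x|) then (1 : Nat) else 0) = 0 :=
      if_neg (by rintro ⟨hc, -, -, -⟩; have := hA.2; omega)
    rw [hz, hz2, add_zero]
    refine if_congr ⟨?_, ?_⟩ rfl rfl
    · rintro ⟨h1, h2, h3, h4⟩; exact ⟨h1, by omega, by rw [h3, ht], h4⟩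
    · rintro ⟨h1, h2, h3, h4⟩; exact ⟨h1, by omega, by rw [h3, ht], h4⟩
  · have hz1 : (if 0 ≤ s ∧ s < (((gx - x).natAbs : Nat) : Int) ∧
        px = x + (if x ≤ gx then 1 else -1) * (((s.toNat : Nat) : Int)) ∧ py = y
        then (1 : Nat) else 0) = 0 :=
      if_neg (by rintro ⟨hc1, hc2, -, -⟩; exact hA ⟨hc1, by omega⟩)
    have hzC1 : (if 0 ≤ s ∧ s < |gx - x| ∧ px = x + (if x ≤ gx then 1 else -1) * s ∧ py = y
        then (1 : Nat)
        else if 0 ≤ s - |gx - x| ∧ s - |gx - x| < |gy - y| ∧ px = gx ∧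
          py = y + (if y ≤ gy then 1 else -1) * (s - |gx - x|) then 1 else 0) =
        if 0 ≤ s - |gx - x| ∧ s - |gx - x| < |gy - y| ∧ px = gx ∧
          py = y + (if y ≤ gy then 1 else -1) * (s - |gx - x|) then 1 else 0 :=
      if_neg (by rintro ⟨hc1, hc2, -, -⟩; exact hA ⟨hc1, hc2⟩)
    rw [hz1, hzC1, zero_add]
    by_cases hB : 0 ≤ s - |gx - x|
    · have ht2 : (((s - |gx - x|).toNat : Nat) : Int) = s - |gx - x| :=
        Int.toNat_of_nonneg hB
      refine if_congr ⟨?_, ?_⟩ rfl rfl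
      · rintro ⟨h1, h2, h3, h4⟩; exact ⟨h1, by omega, h3, by rw [h4, ht2]⟩
      · rintro ⟨h1, h2, h3, h4⟩; exact ⟨h1, by omega, h3, by rw [h4, ht2]⟩
    · rw [if_neg (by rintro ⟨hc, -⟩; exact hB hc),
        if_neg (by rintro ⟨hc, -⟩; exact hB hc)]

-- the heart: cell multiplicity in a route's cell list = indicator of the position query
theorem pvFullCount (points : List (Int × Int)) (ks : List Int) :
    ∀ (x y t0 px py s : Int),
      (pvFull points x y t0 ks).count (px, py, t0 + s) =
        if 0 ≤ s ∧ pvPosGo points x y s ks = some (px, py) then 1 else 0 := by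
  induction ks with
  | nil =>
    intro x y t0 px py s
    simp only [pvFull, pvChain, List.nil_append]
    rw [List.count_singleton]
    simp only [pvPosGo, beq_iff_eq, Prod.mk.injEq]
    by_cases hs : s = 0
    · subst hs
      rw [show t0 + (0 : Int) = t0 by ring]
      simp [Prod.ext_iff]
    · simp only [if_neg hs]
      rw [if_neg (by rintro ⟨-, -, h⟩; omega),
        if_neg (by rintro ⟨-, h⟩; simp at h)]
  | cons k ks ih =>
    intro x y t0 px py s
    have hfull : pvFull points x y t0 (k :: ks) =
        pvSegCells x y t0 (pvLookup points k).1 (pvLookup points k).2 ++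
        pvFull points (pvLookup points k).1 (pvLookup points k).2
          (t0 + |(pvLookup points k).1 - x| + |(pvLookup points k).2 - y|) ks := by
      simp only [pvFull, pvChain, List.append_assoc]
    rw [hfull, List.count_append]
    simp only [pvPosGo]
    generalize pvLookup points k = g
    obtain ⟨gx, gy⟩ := g
    dsimp only
    rw [pvSegCount,
      show t0 + s = t0 + |gx - x| + |gy - y| + (s - |gx - x| - |gy - y|) by ring, ih]
    have hdx0 : 0 ≤ |gx - x| := abs_nonneg (gx - x)
    have hdy0 : 0 ≤ |gy - y| := abs_nonneg (gy - y)
    by_cases hs0 : 0 ≤ s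
    · by_cases hxr : s < |gx - x|
      · have hz : (if 0 ≤ s - |gx - x| - |gy - y| ∧
            pvPosGo points gx gy (s - |gx - x| - |gy - y|) ks = some (px, py)
            then (1 : Nat) else 0) = 0 := if_neg (by rintro ⟨hc, -⟩; omega)
        have hz2 : (if 0 ≤ s - |gx - x| ∧ s - |gx - x| < |gy - y| ∧ px = gx ∧
            py = y + (if y ≤ gy then 1 else -1) * (s - |gx - x|)
            then (1 : Nat) else 0) = 0 := if_neg (by rintro ⟨hc, -⟩; omega)
        rw [hz, add_zero, if_pos hxr]
        simp only [Option.some.injEq, Prod.mk.injEq]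
        by_cases hf : px = x + (if x ≤ gx then 1 else -1) * s ∧ py = y
        · rw [if_pos ⟨hs0, hxr, hf.1, hf.2⟩, if_pos ⟨hs0, hf.1.symm, hf.2.symm⟩]
        · rw [if_neg (by rintro ⟨-, -, hc1, hc2⟩; exact hf ⟨hc1, hc2⟩), hz2,
            if_neg (by rintro ⟨-, hc1, hc2⟩; exact hf ⟨hc1.symm, hc2.symm⟩)]
      · by_cases hyr : s - |gx - x| < |gy - y|
        · have hz : (if 0 ≤ s - |gx - x| - |gy - y| ∧
              pvPosGo points gx gy (s - |gx - x| - |gy - y|) ks = some (px, py)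
              then (1 : Nat) else 0) = 0 := if_neg (by rintro ⟨hc, -⟩; omega)
          rw [hz, add_zero, if_neg (by rintro ⟨-, hc, -, -⟩; exact hxr hc),
            if_neg hxr, if_pos hyr]
          simp only [Option.some.injEq, Prod.mk.injEq]
          by_cases hf : px = gx ∧ py = y + (if y ≤ gy then 1 else -1) * (s - |gx - x|)
          · rw [if_pos ⟨by omega, hyr, hf.1, hf.2⟩, if_pos ⟨hs0, hf.1.symm, hf.2.symm⟩]
          · rw [if_neg (by rintro ⟨-, -, hc1, hc2⟩; exact hf ⟨hc1, hc2⟩),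
              if_neg (by rintro ⟨-, hc1, hc2⟩; exact hf ⟨hc1.symm, hc2.symm⟩)]
        · rw [if_neg (by rintro ⟨-, hc, -, -⟩; exact hxr hc),
            if_neg (by rintro ⟨-, hc, -, -⟩; exact hyr hc), zero_add,
            if_neg hxr, if_neg hyr]
          refine if_congr ⟨?_, ?_⟩ rfl rfl
          · rintro ⟨-, hc⟩; exact ⟨hs0, hc⟩
          · rintro ⟨-, hc⟩; exact ⟨by omega, hc⟩
    · rw [if_neg (by rintro ⟨hc, -⟩; exact hs0 hc),
        if_neg (by rintro ⟨hc, -⟩; omega),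
        if_neg (by rintro ⟨hc, -⟩; omega),
        if_neg (by rintro ⟨hc, -⟩; exact hs0 hc)]

theorem pvRouteCount (points : List (Int × Int)) (route : List Int) (px py T : Int) :
    (pvRouteCells points route).count (px, py, T) =
      if 0 ≤ T ∧ pvPosB points route T = some (px, py) then 1 else 0 := by
  have h := pvFullCount points (route.drop 1) (pvLookup points (route.headD 0)).1
    (pvLookup points (route.headD 0)).2 0 px py T
  rw [zero_add] at h
  simpa [pvRouteCells, pvPosB] using h

-- duration folds: shifting the accumulator, and nonnegativity
theorem pvDurShift (points : List (Int × Int)) (ks : List Int) :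
    ∀ a x y : Int,
      (ks.foldl (fun (st : Int × Int × Int) k =>
        let g := pvLookup points k
        (st.1 + |g.1 - st.2.1| + |g.2 - st.2.2|, g.1, g.2)) (a, x, y)).1 =
      a + (ks.foldl (fun (st : Int × Int × Int) k =>
        let g := pvLookup points k
        (st.1 + |g.1 - st.2.1| + |g.2 - st.2.2|, g.1, g.2)) (0, x, y)).1 := by
  induction ks with
  | nil => intro a x y; simp
  | cons k ks ih =>
    intro a x y
    rw [List.foldl_cons, List.foldl_cons]
    dsimp only
    rw [ih, ih (0 + |(pvLookup points k).1 - x| + |(pvLookup points k).2 - y|)]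
    ring

theorem pvDurNonneg (points : List (Int × Int)) (ks : List Int) :
    ∀ x y : Int,
      0 ≤ (ks.foldl (fun (st : Int × Int × Int) k =>
        let g := pvLookup points k
        (st.1 + |g.1 - st.2.1| + |g.2 - st.2.2|, g.1, g.2)) (0, x, y)).1 := by
  induction ks with
  | nil => intro x y; simp
  | cons k ks ih =>
    intro x y
    rw [List.foldl_cons]
    dsimp only
    rw [pvDurShift]
    have h1 := abs_nonneg ((pvLookup points k).1 - x)
    have h2 := abs_nonneg ((pvLookup points k).2 - y)
    have h3 := ih (pvLookup points k).1 (pvLookup points k).2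
    omega

-- a robot that is still somewhere at time s has not exceeded its travel time
theorem pvPosGo_le (points : List (Int × Int)) (ks : List Int) :
    ∀ (x y s : Int) (p : Int × Int), 0 ≤ s → pvPosGo points x y s ks = some p →
      s ≤ ((ks.foldl
        (fun (st : Int × Int × Int) k =>
          let g := pvLookup points k
          (st.1 + |g.1 - st.2.1| + |g.2 - st.2.2|, g.1, g.2)) (0, x, y)).1) := by
  induction ks with
  | nil =>
    intro x y s p hs0 h
    simp only [pvPosGo] at h
    by_cases h1 : s = 0
    · simp [h1]
    · rw [if_neg h1] at h
      exact absurd h (by simp)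
  | cons k ks ih =>
    intro x y s p hs0 h
    simp only [pvPosGo] at h
    rw [List.foldl_cons]
    dsimp only
    rw [pvDurShift]
    have hdx0 := abs_nonneg ((pvLookup points k).1 - x)
    have hdy0 := abs_nonneg ((pvLookup points k).2 - y)
    have hnn := pvDurNonneg points ks (pvLookup points k).1 (pvLookup points k).2
    by_cases h1 : s < |(pvLookup points k).1 - x|
    · omega
    · rw [if_neg h1] at h
      by_cases h2 : s - |(pvLookup points k).1 - x| < |(pvLookup points k).2 - y|
      · omega
      · rw [if_neg h2] at h
        have := ih (pvLookup points k).1 (pvLookup points k).2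
          (s - |(pvLookup points k).1 - x| - |(pvLookup points k).2 - y|) p (by omega) h
        omega

theorem pvPosB_le (points : List (Int × Int)) (route : List Int) (s : Int) (p : Int × Int)
    (h0 : 0 ≤ s) (h : pvPosB points route s = some p) : s ≤ pvDurB points route := by
  exact pvPosGo_le points (route.drop 1) (pvLookup points (route.headD 0)).1
    (pvLookup points (route.headD 0)).2 s p h0 h

-- list sum over range = Finset sum over range
theorem pvSumRangeInt (n : Nat) (f : Nat → Int) :
    ((List.range n).map f).sum = ∑ i ∈ Finset.range n, f i := by
  induction n with
  | zero => simp
  | succ n ih =>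
    rw [List.range_succ, List.map_append, List.sum_append, Finset.sum_range_succ, ih]
    simp

-- pvCountDup as a Finset cardinality
theorem pvCountDup_card {α : Type} [BEq α] [LawfulBEq α] [DecidableEq α] (L : List α) :
    pvCountDup L =
      (((L.toFinset.filter (fun c => 2 ≤ (L.count c : Int))).card : Nat) : Int) := by
  unfold pvCountDup
  congr 1
  rw [List.countP_eq_length_filter]
  have hnd : ((PySem.Set.ofList L).filter
      (fun c => decide (2 ≤ (L.count c : Int)))).Nodup :=
    (PySem.Set.nodup_ofList L).filter _
  rw [← List.toFinset_card_of_nodup hnd, List.toFinset_filter]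
  congr 1
  ext c
  simp [PySem.Set.mem_ofList]

-- multiplicity of a cell in A's global cell list = multiplicity of the position in B's row
theorem pvCellCount (points : List (Int × Int)) (routes : List (List Int))
    (px py T : Int) (hT : 0 ≤ T) :
    ((routes.map (pvRouteCells points)).flatten).count (px, py, T) =
      (routes.filterMap (fun r => pvPosB points r T)).count (px, py) := by
  rw [List.count_flatten, List.map_map, List.count_filterMap]
  have h1 : routes.map (List.count (px, py, T) ∘ pvRouteCells points) =
      routes.map (fun r =>
        if decide (0 ≤ T ∧ pvPosB points r T = some (px, py)) = true then 1 else 0) :=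
    List.map_congr_left (fun r _ => by
      have := pvRouteCount points r px py T
      simpa using this)
  rw [h1, PySem.List.sum_map_ite_one_zero_nat]
  refine List.countP_congr (fun r _ => ?_)
  simp [hT]

-- every cell of A's list lies in the swept time window
theorem pvCellTime (points : List (Int × Int)) (routes : List (List Int))
    (c : Int × Int × Int) (hc : c ∈ (routes.map (pvRouteCells points)).flatten) :
    0 ≤ c.2.2 ∧ ∃ r ∈ routes, c.2.2 ≤ pvDurB points r := by
  rw [List.mem_flatten] at hc
  obtain ⟨l, hl, hcl⟩ := hc
  rw [List.mem_map] at hl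
  obtain ⟨r, hr, rfl⟩ := hl
  obtain ⟨px, py, T⟩ := c
  have hcount : 0 < (pvRouteCells points r).count (px, py, T) :=
    List.count_pos_iff.2 hcl
  rw [pvRouteCount] at hcount
  split_ifs at hcount with hcond
  · exact ⟨hcond.1, r, hr, pvPosB_le points r T (px, py) hcond.1 hcond.2⟩
  · omega

-- the partition of A's duplicated cells by their time stamp
theorem pvPartition (points : List (Int × Int)) (routes : List (List Int)) (n : Nat)
    (hn : ∀ r ∈ routes, pvDurB points r < (n : Int)) :
    pvCountDup ((routes.map (pvRouteCells points)).flatten) =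
      ((List.range n).map (fun (tN : Nat) =>
        pvCountDup (routes.filterMap (fun r => pvPosB points r (tN : Int))))).sum := by
  have hR : ((List.range n).map (fun (tN : Nat) =>
      pvCountDup (routes.filterMap (fun r => pvPosB points r (tN : Int))))) =
      ((List.range n).map (fun (tN : Nat) =>
        ((((routes.filterMap (fun r => pvPosB points r (tN : Int))).toFinset.filter
          (fun p => 2 ≤ ((routes.filterMap (fun r => pvPosB points r (tN : Int))).count p : Int))).card : Nat) : Int))) :=
    List.map_congr_left (fun tN _ => pvCountDup_card _)
  rw [pvCountDup_card, hR, pvSumRangeInt]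
  have hbij : ((routes.map (pvRouteCells points)).flatten).toFinset.filter
        (fun c => 2 ≤ (((routes.map (pvRouteCells points)).flatten).count c : Int)) =
      (Finset.range n).biUnion (fun tN =>
        ((routes.filterMap (fun r => pvPosB points r (tN : Int))).toFinset.filter
          (fun p => 2 ≤ ((routes.filterMap (fun r => pvPosB points r (tN : Int))).count p : Int))).image
          (fun p => (p.1, p.2, (tN : Int)))) := by
    ext c
    obtain ⟨px, py, T⟩ := c
    simp only [Finset.mem_filter, Finset.mem_biUnion, Finset.mem_image, Finset.mem_range,
      List.mem_toFinset]
    constructor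
    · rintro ⟨hmem, h2⟩
      obtain ⟨hT0, r, hr, hdur⟩ := pvCellTime points routes (px, py, T) hmem
      dsimp only at hT0 hdur
      have hTn : T.toNat < n := by have := hn r hr; omega
      refine ⟨T.toNat, hTn, (px, py), ⟨?_, ?_⟩, ?_⟩
      · rw [Int.toNat_of_nonneg hT0, ← List.count_pos_iff,
          ← pvCellCount points routes px py T hT0]
        exact List.count_pos_iff.2 hmem
      · rw [Int.toNat_of_nonneg hT0, ← pvCellCount points routes px py T hT0]
        exact h2
      · rw [Int.toNat_of_nonneg hT0]
    · rintro ⟨tN, htN, ⟨qx, qy⟩, ⟨hqmem, hq2⟩, heq⟩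
      obtain ⟨rfl, rfl, rfl⟩ : qx = px ∧ qy = py ∧ (tN : Int) = T := by
        exact ⟨congrArg (fun q : Int × Int × Int => q.1) heq,
          congrArg (fun q : Int × Int × Int => q.2.1) heq,
          congrArg (fun q : Int × Int × Int => q.2.2) heq⟩
      have hT0 : (0 : Int) ≤ (tN : Int) := Int.natCast_nonneg tN
      have hc := pvCellCount points routes qx qy (tN : Int) hT0
      constructor
      · rw [← List.count_pos_iff, hc]
        exact List.count_pos_iff.2 hqmem
      · rw [hc]
        exact hq2
  rw [hbij, Finset.card_biUnion, Nat.cast_sum]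
  · refine Finset.sum_congr rfl (fun tN _ => ?_)
    congr 1
    exact Finset.card_image_of_injective _
      (fun a b hab => by
        obtain ⟨a1, a2⟩ := a
        obtain ⟨b1, b2⟩ := b
        simpa [Prod.ext_iff] using hab)
  · intro a _ b _ hne
    simp only [Finset.disjoint_left, Finset.mem_image]
    rintro c ⟨p, -, rfl⟩ ⟨q, -, hq⟩
    have h3 : (b : Int) = (a : Int) := congrArg (fun z : Int × Int × Int => z.2.2) hq
    exact hne (by exact_mod_cast h3.symm)

-- ===== VERDICT (by name: the statement is the Claim_ definition above) =====
theorem collision_risk_prevention_spec : Claim_equal_collision_risk_prevention := by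
  intro points routes _ hPre
  unfold Spec_collision_risk_prevention
  obtain ⟨hlen, -⟩ := hPre
  show collision_risk_prevention points routes = _
  unfold collision_risk_prevention collision_risk_prevention_alt
  dsimp only
  rw [pvTopA points routes hlen [] (0, 0), List.nil_append, pvCounterFold,
    PySem.List.foldl_add, zero_add]
  have hR : (List.range
        ((PySem.List.maxD (routes.map (pvDurB points)) (fun x => x) (-1) + 1).toNat)).map
      (fun (tN : Nat) =>
        (routes.foldl
          (fun (d : PySem.Dict (Int × Int) Int) r =>
            match pvPosB points r (tN : Int) with
            | none => d
            | some p => d.insert p (d.getD p 0 + 1)) PySem.Dict.empty).values.foldl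
          (fun s c => if 2 ≤ c then s + 1 else s) 0) =
      (List.range
        ((PySem.List.maxD (routes.map (pvDurB points)) (fun x => x) (-1) + 1).toNat)).map
      (fun (tN : Nat) =>
        pvCountDup (routes.filterMap (fun r => pvPosB points r (tN : Int)))) := by
    refine List.map_congr_left (fun tN _ => ?_)
    rw [pvHereDict, pvCounterFold]
  rw [hR]
  refine pvPartition points routes _ (fun r hr => ?_)
  have hmem : pvDurB points r ∈ routes.map (pvDurB points) :=
    List.mem_map_of_mem hr
  have hnn : 0 ≤ pvDurB points r := by
    have := pvDurNonneg points (r.drop 1) (pvLookup points (r.headD 0)).1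
      (pvLookup points (r.headD 0)).2
    exact this
  have hle : pvDurB points r ≤ PySem.List.maxD (routes.map (pvDurB points)) (fun x => x) (-1) := by
    unfold PySem.List.maxD
    cases hq : PySem.List.max? (routes.map (pvDurB points)) (fun x => x) with
    | none =>
      have hnil : routes.map (pvDurB points) = [] :=
        (PySem.List.max?_eq_none_iff _ _).mp hq
      rw [hnil] at hmem
      exact absurd hmem (by simp)
    | some m => exact PySem.List.max?_isMax hq _ hmem
  omega
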